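-- pv_equiv track=rewrite | github.com/aerlbaum3/PythonPractice | Assingment 1.py | replace_numbers_with_text
-- ===== SOURCE A (Python) =====
-- def replace_numbers_with_text(input_string):
--     # Create a mapping to map each digit to its text representation
--     numbers_allocation = {
--         '0': 'zero', '1': 'one', '2': 'two', '3': 'three', '4': 'four',
--         '5': 'five', '6': 'six', '7': 'seven', '8': 'eight', '9': 'nine'
--     }
--
--     # Create a mapping to handle numbers between 10 and 19
--     teens_allocation = {
--         '10': 'ten', '11': 'eleven', '12': 'twelve', '13': 'thirteen', '14': 'fourteen',
--         '15': 'fifteen', '16': 'sixteen', '17': 'seventeen', '18': 'eighteen', '19': 'nineteen'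
--     }
--
--     # Create a mapping for the tens place
--     tens_allocation = {
--         '2': 'twenty', '3': 'thirty', '4': 'forty', '5': 'fifty',
--         '6': 'sixty', '7': 'seventy', '8': 'eighty', '9': 'ninety'
--     }
--
--     # Split the input string into words
--     words = input_string.split()
--
--     # Iterate through the words and replace any numbers with their text representation
--     for i in range(len(words)):
--         if words[i].isdigit():
--             # If the word is a number, replace it with the text representation
--             if len(words[i]) == 1:
--                 words[i] = numbers_allocation[words[i]]
--             elif len(words[i]) == 2:
--                 if words[i][0] == '1':
--                     words[i] = teens_allocation[words[i]]
--                 else: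
--                     if words[i][1] != '0':
--                         words[i] = tens_allocation[words[i][0]] + ' ' + numbers_allocation[words[i][1]]
--                     else:
--                         words[i] = tens_allocation[words[i][0]]
--
--     # Join the words back into a string
--     output_string = ' '.join(words)
--     return output_string
-- ===== SOURCE B (Python) =====
-- def replace_numbers_with_text(input_string):
--     ones = ['zero', 'one', 'two', 'three', 'four',
--             'five', 'six', 'seven', 'eight', 'nine']
--     teens = ['ten', 'eleven', 'twelve', 'thirteen', 'fourteen',
--              'fifteen', 'sixteen', 'seventeen', 'eighteen', 'nineteen']
--     tens = ['twenty', 'thirty', 'forty', 'fifty',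
--             'sixty', 'seventy', 'eighty', 'ninety']
--
--     # One flat table for every spelled number 0..99 whose decimal form A accepts
--     # (two-character keys with a leading zero digit are deliberately absent, as in A).
--     table = {}
--     for o in range(10):
--         table[str(o)] = ones[o]
--     for o in range(10):
--         table[str(10 + o)] = teens[o]
--     for t in range(2, 10):
--         table[str(10 * t)] = tens[t - 2]
--         for o in range(1, 10):
--             table[str(10 * t + o)] = tens[t - 2] + ' ' + ones[o]
--
--     return ' '.join(table[w] if w.isdigit() and len(w) <= 2 else w
--                     for w in input_string.split())
-- ===== Notes on version B (the rewrite author's own statement) =====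
-- stated objective: simpler
-- what changed: A's three dicts and per-word length/leading-digit branch tree are replaced by one flat lookup table (built up front, keyed by every decimal form A accepts) so the per-word work collapses to a single guarded table lookup.
import Mathlib
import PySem

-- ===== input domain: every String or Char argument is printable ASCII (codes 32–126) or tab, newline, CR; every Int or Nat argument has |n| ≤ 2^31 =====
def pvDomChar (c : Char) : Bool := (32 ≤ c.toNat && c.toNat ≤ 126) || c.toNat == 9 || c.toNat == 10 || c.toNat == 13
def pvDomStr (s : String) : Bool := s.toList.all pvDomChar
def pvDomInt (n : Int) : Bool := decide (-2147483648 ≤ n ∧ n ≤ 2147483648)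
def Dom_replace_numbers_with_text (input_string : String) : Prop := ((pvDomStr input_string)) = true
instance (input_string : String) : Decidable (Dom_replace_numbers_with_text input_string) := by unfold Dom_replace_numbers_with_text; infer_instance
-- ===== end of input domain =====

-- B replaces A's three dicts and per-word branch tree by ONE flat table 0..99 built up front
-- and a single table lookup per word (objective: simpler decomposition, same cost).

-- ===== PORT A =====
def pvNumbersAllocation : PySem.Dict String String :=
  PySem.Dict.ofList [("0", "zero"), ("1", "one"), ("2", "two"), ("3", "three"), ("4", "four"),
    ("5", "five"), ("6", "six"), ("7", "seven"), ("8", "eight"), ("9", "nine")]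

def pvTeensAllocation : PySem.Dict String String :=
  PySem.Dict.ofList [("10", "ten"), ("11", "eleven"), ("12", "twelve"), ("13", "thirteen"),
    ("14", "fourteen"), ("15", "fifteen"), ("16", "sixteen"), ("17", "seventeen"),
    ("18", "eighteen"), ("19", "nineteen")]

def pvTensAllocation : PySem.Dict String String :=
  PySem.Dict.ofList [("2", "twenty"), ("3", "thirty"), ("4", "forty"), ("5", "fifty"),
    ("6", "sixty"), ("7", "seventy"), ("8", "eighty"), ("9", "ninety")]

-- the body of A's loop: what words[i] becomes (dict accesses that can only miss on
-- inputs excluded by Pre_ are ported with getD; the KeyError inputs are outside Pre_)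
def pvConvA (w : String) : String :=
  if PySem.Str.strIsdigit w then
    if PySem.Str.len w = 1 then
      pvNumbersAllocation.getD w w
    else if PySem.Str.len w = 2 then
      if PySem.Str.pyGet? w 0 = some '1' then
        pvTeensAllocation.getD w w
      else
        if PySem.Str.pyGet? w 1 ≠ some '0' then
          pvTensAllocation.getD (String.ofList ((PySem.Str.pyGet? w 0).toList)) w ++ " " ++
            pvNumbersAllocation.getD (String.ofList ((PySem.Str.pyGet? w 1).toList)) w
        else
          pvTensAllocation.getD (String.ofList ((PySem.Str.pyGet? w 0).toList)) w
    else w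
  else w

def replace_numbers_with_text (input_string : String) : String :=
  PySem.Str.join " " ((PySem.Str.split₀ input_string).map pvConvA)

-- ===== PORT B =====
def pvOnes : List String :=
  ["zero", "one", "two", "three", "four", "five", "six", "seven", "eight", "nine"]

def pvTeens : List String :=
  ["ten", "eleven", "twelve", "thirteen", "fourteen", "fifteen", "sixteen", "seventeen",
   "eighteen", "nineteen"]

def pvTens : List String :=
  ["twenty", "thirty", "forty", "fifty", "sixty", "seventy", "eighty", "ninety"]

-- the flat table Source B builds with its three range loops (list indexing in range: getD is exact)
def pvTable : PySem.Dict String String :=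
  let d1 := (PySem.List.pyRange 0 10 1).foldl
    (fun d o => d.insert (PySem.Int.toStr o) (PySem.List.pyGetD pvOnes o "")) PySem.Dict.empty
  let d2 := (PySem.List.pyRange 0 10 1).foldl
    (fun d o => d.insert (PySem.Int.toStr (10 + o)) (PySem.List.pyGetD pvTeens o "")) d1
  (PySem.List.pyRange 2 10 1).foldl
    (fun d t =>
      (PySem.List.pyRange 1 10 1).foldl
        (fun d o => d.insert (PySem.Int.toStr (10 * t + o))
          (PySem.List.pyGetD pvTens (t - 2) "" ++ " " ++ PySem.List.pyGetD pvOnes o ""))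
        (d.insert (PySem.Int.toStr (10 * t)) (PySem.List.pyGetD pvTens (t - 2) "")))
    d2

-- Source B's per-word expression: table[w] if w.isdigit() and len(w) <= 2 else w
-- (table[w] can only miss on inputs excluded by Pre_)
def pvConvB (w : String) : String :=
  if PySem.Str.strIsdigit w && decide (PySem.Str.len w ≤ 2) then pvTable.getD w w else w

def replace_numbers_with_text_alt (input_string : String) : String :=
  PySem.Str.join " " ((PySem.Str.split₀ input_string).map pvConvB)

-- ===== PRECONDITION & SPEC =====
-- Pre_ excludes exactly the inputs on which the Python A raises KeyError (and B does too):
-- those containing a whitespace-separated word that is a two-character digit string whose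
-- first character is the zero digit.
def Pre_replace_numbers_with_text (input_string : String) : Prop :=
  ∀ w ∈ PySem.Str.split₀ input_string,
    ¬ (PySem.Str.strIsdigit w = true ∧ PySem.Str.len w = 2 ∧ PySem.Str.pyGet? w 0 = some '0')
instance (input_string : String) : Decidable (Pre_replace_numbers_with_text input_string) := by
  unfold Pre_replace_numbers_with_text; infer_instance

def pvWitness_replace_numbers_with_text : String := "i have 21 cats and 10 dogs 100 x 7"

def Spec_replace_numbers_with_text (input_string : String) (out : String) : Prop := out = replace_numbers_with_text_alt input_string
instance (input_string : String) (out : String) : Decidable (Spec_replace_numbers_with_text input_string out) := by unfold Spec_replace_numbers_with_text; infer_instance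

-- ===== CLAIM (what is proved, stated in full; the proofs are below) =====
def Claim_equal_replace_numbers_with_text : Prop := ∀ (input_string : String), Dom_replace_numbers_with_text input_string → Pre_replace_numbers_with_text input_string → Spec_replace_numbers_with_text input_string (replace_numbers_with_text input_string)

-- ===== LEMMAS AND PROOFS =====

-- a char with Python isdigit true is one of the ten ASCII digits
lemma pvDigitChar_mem (c : Char) (h : PySem.Chars.isdigit c = true) :
    c ∈ ['0', '1', '2', '3', '4', '5', '6', '7', '8', '9'] := by
  have h1 : 48 ≤ c.toNat ∧ c.toNat ≤ 57 := by
    simp [PySem.Chars.isdigit, Char.le_def, UInt32.le_iff_toNat_le] at h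
    exact h
  obtain ⟨ha, hb⟩ := h1
  rw [← Char.ofNat_toNat c]
  interval_cases h : c.toNat <;> decide

-- per-word agreement of the two loop bodies, away from the KeyError words
set_option maxRecDepth 100000 in
lemma pvConv_eq_list (l : List Char)
    (hb : ¬ (PySem.Chars.strIsdigit l = true ∧ l.length = 2 ∧ l[0]? = some '0')) :
    pvConvA (String.ofList l) = pvConvB (String.ofList l) := by
  by_cases hd : PySem.Chars.strIsdigit l = true
  · rcases l with _ | ⟨c, _ | ⟨d, _ | ⟨e, rest⟩⟩⟩
    · simp [PySem.Chars.strIsdigit] at hd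
    · -- one digit character
      have hc : PySem.Chars.isdigit c = true := by
        simpa [PySem.Chars.strIsdigit] using hd
      have h1 := pvDigitChar_mem c hc
      fin_cases h1 <;> decide
    · -- two digit characters; the leading-zero words are excluded by hb
      have hcd : PySem.Chars.isdigit c = true ∧ PySem.Chars.isdigit d = true := by
        simpa [PySem.Chars.strIsdigit] using hd
      have hc0 : c ≠ '0' := fun h0 => hb ⟨hd, rfl, by rw [h0]; rfl⟩
      have h1 := pvDigitChar_mem c hcd.1
      have h2 := pvDigitChar_mem d hcd.2
      fin_cases h1 <;> first
        | exact absurd rfl hc0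
        | (fin_cases h2 <;> decide)
    · -- three or more characters: both sides leave the word unchanged
      have hlen : PySem.Str.len (String.ofList (c :: d :: e :: rest)) =
          ((rest.length : Int) + 3) := by
        simp; ring
      simp only [pvConvA, pvConvB, hlen]
      have h1 : ¬ ((rest.length : Int) + 3 = 1) := by omega
      have h2 : ¬ ((rest.length : Int) + 3 = 2) := by omega
      have h3 : ¬ ((rest.length : Int) + 3 ≤ 2) := by omega
      simp [h1, h2, h3]
  · have hd' : PySem.Chars.strIsdigit l = false := by simpa using hd
    have hS : PySem.Str.strIsdigit (String.ofList l) = false := by simpa using hd'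
    simp [pvConvA, pvConvB, hd']

-- ===== VERDICT (by name: the statement is the Claim_ definition above) =====
theorem replace_numbers_with_text_spec : Claim_equal_replace_numbers_with_text := by
  intro s _hDom hPre
  unfold Spec_replace_numbers_with_text replace_numbers_with_text replace_numbers_with_text_alt
  congr 1
  apply List.map_congr_left
  intro w hw
  have hb : ¬ (PySem.Chars.strIsdigit w.toList = true ∧ w.toList.length = 2 ∧
      w.toList[0]? = some '0') := by
    rintro ⟨h1, h2, h3⟩
    refine hPre w hw ⟨by simpa using h1, by simp [h2], ?_⟩
    have hpos : 0 < w.length := by rw [← String.length_toList]; omega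
    simp [PySem.List.pyGet?, PySem.List.pyIdx?, hpos]
    rw [List.getElem?_eq_some_iff] at h3
    obtain ⟨_, h4⟩ := h3
    exact h4
  have := pvConv_eq_list w.toList hb
  simpa [String.ofList_toList] using this
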